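-- pv_equiv track=rewrite | github.com/mukul975/Privacy-Data-Protection-Skills | plugins/vendor-privacy-management-skills/skills/vendor-risk-scoring/scripts/process.py | score_certifications
-- ===== SOURCE A (Python) =====
-- def score_certifications(certifications: list[str]) -> int:
--     """Score certifications dimension (inverse — more certs = lower risk)."""
--     cert_set = {c.lower() for c in certifications}
--
--     has_27001 = any("27001" in c for c in cert_set)
--     has_27701 = any("27701" in c for c in cert_set)
--     has_soc2 = any("soc 2" in c or "soc2" in c for c in cert_set)
--     has_sector = any(
--         term in c for c in cert_set
--         for term in ["27018", "27017", "csa star level 2", "hitrust"]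
--     )
--
--     if has_27001 and has_27701 and has_soc2:
--         return 1
--     elif has_27001 and has_soc2:
--         return 2
--     elif has_27001 or has_soc2:
--         return 3
--     elif any("star" in c or "self-assessment" in c for c in cert_set):
--         return 4
--     return 5
-- ===== SOURCE B (Python) =====
-- # Data-driven: OR each cert's pattern bits into a mask, then one table lookup.
-- _PATTERNS = [(1, ("27001",)),
--              (2, ("soc 2", "soc2")),
--              (4, ("27701",)),
--              (8, ("star", "self-assessment"))]
--
-- # index = bit0:27001, bit1:soc2, bit2:27701, bit3:star
-- _SCORE_BY_MASK = [5, 3, 3, 2, 5, 3, 3, 1, 4, 3, 3, 2, 4, 3, 3, 1]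
--
-- def score_certifications(certifications: list[str]) -> int:
--     """Score certifications dimension (inverse — more certs = lower risk)."""
--     mask = 0
--     for cert in certifications:
--         c = cert.lower()
--         for bit, pats in _PATTERNS:
--             if any(p in c for p in pats):
--                 mask |= bit
--     return _SCORE_BY_MASK[mask]
-- ===== Notes on version B (the rewrite author's own statement) =====
-- stated objective: alternative
-- what changed: Replaces the boolean flags and if/elif cascade with a data-driven design: a pattern table ORs per-cert bits into a 4-bit mask and the score is a single lookup in a precomputed 16-entry table (the dead has_sector scan is dropped).
import Mathlib
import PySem

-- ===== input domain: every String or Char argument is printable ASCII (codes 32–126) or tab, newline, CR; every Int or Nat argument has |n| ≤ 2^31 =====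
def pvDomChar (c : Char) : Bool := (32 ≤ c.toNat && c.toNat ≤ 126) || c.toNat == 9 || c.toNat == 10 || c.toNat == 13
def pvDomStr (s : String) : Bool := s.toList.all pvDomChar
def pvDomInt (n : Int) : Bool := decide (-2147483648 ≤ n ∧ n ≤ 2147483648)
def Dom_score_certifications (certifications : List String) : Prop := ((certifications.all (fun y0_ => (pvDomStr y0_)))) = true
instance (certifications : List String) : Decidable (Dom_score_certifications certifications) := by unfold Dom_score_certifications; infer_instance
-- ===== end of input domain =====

-- B replaces the boolean flags and if/elif cascade with a pattern table ORing bits into a mask plus a 16-entry score lookup (the dead has_sector scan is dropped).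


-- ===== PORT A =====
def score_certifications (certifications : List String) : Int :=
  let cert_set : PySem.Set String :=
    PySem.Set.ofList (certifications.map (fun c => PySem.Str.lower c))
  let has_27001 := cert_set.any (fun c => PySem.Str.isIn "27001" c)
  let has_27701 := cert_set.any (fun c => PySem.Str.isIn "27701" c)
  let has_soc2 := cert_set.any (fun c => PySem.Str.isIn "soc 2" c || PySem.Str.isIn "soc2" c)
  -- dead in A too: computed, never used
  let _has_sector := cert_set.any (fun c =>
    (["27018", "27017", "csa star level 2", "hitrust"] : List String).any
      (fun term => PySem.Str.isIn term c))
  if has_27001 && has_27701 && has_soc2 then 1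
  else if has_27001 && has_soc2 then 2
  else if has_27001 || has_soc2 then 3
  else if cert_set.any (fun c => PySem.Str.isIn "star" c || PySem.Str.isIn "self-assessment" c) then 4
  else 5

-- ===== PORT B =====
def pvPatterns : List (Nat × List String) :=
  [(1, ["27001"]), (2, ["soc 2", "soc2"]), (4, ["27701"]), (8, ["star", "self-assessment"])]

-- index = bit0:27001, bit1:soc2, bit2:27701, bit3:star
def pvScoreByMask : List Int := [5, 3, 3, 2, 5, 3, 3, 1, 4, 3, 3, 2, 4, 3, 3, 1]

-- the inner loop of Source B: OR this cert's pattern bits into the mask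
def pvAddCert (mask : Nat) (cert : String) : Nat :=
  let c := PySem.Str.lower cert
  pvPatterns.foldl
    (fun m bp => if bp.2.any (fun p => PySem.Str.isIn p c) then m ||| bp.1 else m) mask

def score_certifications_alt (certifications : List String) : Int :=
  PySem.List.pyGetD pvScoreByMask ((certifications.foldl pvAddCert 0 : Nat) : Int) 0

-- ===== PRECONDITION & SPEC =====
def Spec_score_certifications (certifications : List String) (out : Int) : Prop := out = score_certifications_alt certifications
instance (certifications : List String) (out : Int) : Decidable (Spec_score_certifications certifications out) := by unfold Spec_score_certifications; infer_instance

-- ===== CLAIM =====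
def Claim_equal_score_certifications : Prop := ∀ (certifications : List String), Dom_score_certifications certifications → Spec_score_certifications certifications (score_certifications certifications)

-- ===== LEMMAS AND PROOFS =====

-- the four per-string predicates
def pvQ1 (c : String) : Bool := PySem.Str.isIn "27001" (PySem.Str.lower c)
def pvQ2 (c : String) : Bool := PySem.Str.isIn "soc 2" (PySem.Str.lower c) || PySem.Str.isIn "soc2" (PySem.Str.lower c)
def pvQ3 (c : String) : Bool := PySem.Str.isIn "27701" (PySem.Str.lower c)
def pvQ4 (c : String) : Bool := PySem.Str.isIn "star" (PySem.Str.lower c) || PySem.Str.isIn "self-assessment" (PySem.Str.lower c)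

def pvEncode (a b c d : Bool) : Nat :=
  (cond a 1 0) ||| (cond b 2 0) ||| (cond c 4 0) ||| (cond d 8 0)

-- any over set(xs) equals any over xs: same members, Bool.any is membership-determined
theorem any_ofList {α : Type} [BEq α] [LawfulBEq α] (l : List α) (p : α → Bool) :
    (PySem.Set.ofList l).any p = l.any p := by
  by_cases h : l.any p = true
  · rw [h]
    rw [List.any_eq_true] at h ⊢
    obtain ⟨x, hx, hp⟩ := h
    exact ⟨x, (PySem.Set.mem_ofList l x).mpr hx, hp⟩
  · rw [Bool.eq_false_iff.mpr h]
    rw [Bool.eq_false_iff]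
    intro hc
    apply h
    rw [List.any_eq_true] at hc ⊢
    obtain ⟨x, hx, hp⟩ := hc
    exact ⟨x, (PySem.Set.mem_ofList l x).mp hx, hp⟩

theorem pvAddCert_encode (a b c d : Bool) (x : String) :
    pvAddCert (pvEncode a b c d) x
      = pvEncode (a || pvQ1 x) (b || pvQ2 x) (c || pvQ3 x) (d || pvQ4 x) := by
  simp only [pvAddCert, pvPatterns, List.foldl_cons, List.foldl_nil, List.any_cons,
    List.any_nil, Bool.or_false]
  rcases h1 : pvQ1 x <;> rcases h2 : pvQ2 x <;> rcases h3 : pvQ3 x <;> rcases h4 : pvQ4 x <;>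
    simp only [pvQ1, pvQ2, pvQ3, pvQ4] at h1 h2 h3 h4 <;>
    simp only [h1, h2, h3, h4, if_true, Bool.or_true, Bool.or_false] <;>
    cases a <;> cases b <;> cases c <;> cases d <;> decide

theorem foldl_pvAddCert (l : List String) (a b c d : Bool) :
    l.foldl pvAddCert (pvEncode a b c d)
      = pvEncode (a || l.any pvQ1) (b || l.any pvQ2) (c || l.any pvQ3) (d || l.any pvQ4) := by
  induction l generalizing a b c d with
  | nil => simp
  | cons x rest ih =>
    simp only [List.foldl_cons, List.any_cons, pvAddCert_encode, ih, Bool.or_assoc]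

-- ===== VERDICT =====
theorem score_certifications_spec : Claim_equal_score_certifications := by
  intro certifications _
  show score_certifications certifications = score_certifications_alt certifications
  unfold score_certifications score_certifications_alt
  have h0 : (0 : Nat) = pvEncode false false false false := by decide
  rw [h0, foldl_pvAddCert]
  simp only [any_ofList, List.any_map, Bool.false_or, Function.comp_def]
  have e1 : (certifications.any fun c => PySem.Str.isIn "27001" (PySem.Str.lower c)) = certifications.any pvQ1 := rfl
  have e2 : (certifications.any fun c => PySem.Str.isIn "soc 2" (PySem.Str.lower c) || PySem.Str.isIn "soc2" (PySem.Str.lower c)) = certifications.any pvQ2 := rfl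
  have e3 : (certifications.any fun c => PySem.Str.isIn "27701" (PySem.Str.lower c)) = certifications.any pvQ3 := rfl
  have e4 : (certifications.any fun c => PySem.Str.isIn "star" (PySem.Str.lower c) || PySem.Str.isIn "self-assessment" (PySem.Str.lower c)) = certifications.any pvQ4 := rfl
  rw [e1, e2, e3, e4]
  cases certifications.any pvQ1 <;> cases certifications.any pvQ2 <;>
    cases certifications.any pvQ3 <;> cases certifications.any pvQ4 <;> decide
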